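-- pv_equiv track=rewrite | github.com/jitendraprajapati9956/Python-Basic-to-Advanced | 23-RegEx.py | easy_longest_word
-- ===== SOURCE A (Python) =====
-- def easy_longest_word(string):
--     count = 0
--     maximum = 0
--     for char in string:
--         if char.isalnum():
--             count += 1
--         else:
--             maximum = max(maximum, count)
--             count = 0
--     maximum = max(maximum, count)
--     return maximum
--
-- string = 'fun!@#$# times'
-- ===== SOURCE B (Python) =====
-- def easy_longest_word(string):
--     # Split the string on every non-alphanumeric character (each such char
--     # replaced by a separator), then take the length of the longest piece.
--     pieces = ''.join(c if c.isalnum() else '\n' for c in string).split('\n')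
--     return max(len(piece) for piece in pieces)
-- ===== Notes on version B (the rewrite author's own statement) =====
-- stated objective: idiomatic
-- what changed: Replaces the manual counter/reset loop with a split-then-maximize decomposition: non-alphanumeric characters become separators, the string is split on them, and the answer is the maximum piece length (the split always yields at least one piece, so no default is needed).
import Mathlib
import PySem

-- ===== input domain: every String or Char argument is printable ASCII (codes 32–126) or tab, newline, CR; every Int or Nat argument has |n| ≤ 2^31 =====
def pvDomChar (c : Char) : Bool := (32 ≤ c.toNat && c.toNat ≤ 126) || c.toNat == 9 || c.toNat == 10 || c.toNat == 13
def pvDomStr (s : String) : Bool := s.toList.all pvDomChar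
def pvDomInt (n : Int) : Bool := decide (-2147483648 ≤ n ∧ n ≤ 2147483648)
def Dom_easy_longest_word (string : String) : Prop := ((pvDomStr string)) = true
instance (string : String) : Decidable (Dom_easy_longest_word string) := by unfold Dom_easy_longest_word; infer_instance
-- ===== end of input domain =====

-- B replaces A's counter/reset loop by a split-on-separators-then-maximize decomposition (idiomatic, same O(n) cost).

-- ===== PORT A =====
-- literal port of A's loop: state (count, maximum), final max(maximum, count)
def easy_longest_word (string : String) : Int :=
  let p := string.toList.foldl
    (fun (st : Int × Int) char =>
      if PySem.Chars.isalnum char then (st.1 + 1, st.2)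
      else (0, max st.2 st.1))
    (0, 0)
  max p.2 p.1

-- ===== PORT B =====
-- port of Source B: map non-alnum chars to the separator '\n', split on it
-- (str.split with the one-char separator = List.splitOnP on that char),
-- then max over the piece lengths; the split is always nonempty, so the
-- [] branch of the match is unreachable (Python's max gets a nonempty input).
def easy_longest_word_alt (string : String) : Int :=
  let pieces := (string.toList.map (fun c => if PySem.Chars.isalnum c then c else '\n')).splitOnP (· == '\n')
  match pieces.map (fun piece => (piece.length : Int)) with
  | [] => 0
  | l :: ls => ls.foldl max l

-- ===== PRECONDITION & SPEC =====
def Spec_easy_longest_word (string : String) (out : Int) : Prop := out = easy_longest_word_alt string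
instance (string : String) (out : Int) : Decidable (Spec_easy_longest_word string out) := by unfold Spec_easy_longest_word; infer_instance

-- ===== CLAIM (what is proved, stated in full; the proofs are below) =====
def Claim_equal_easy_longest_word : Prop := ∀ (string : String), Dom_easy_longest_word string → Spec_easy_longest_word string (easy_longest_word string)

-- ===== LEMMAS AND PROOFS =====

-- max over pieces where the first piece is extended by `count` pending characters
def pvGmax (count : Int) : List (List Char) → Int
  | [] => count
  | p :: ps => max (count + (p.length : Int)) (pvGmax 0 ps)

theorem pvGmax_nonneg (ps : List (List Char)) (count : Int) (h : 0 ≤ count) :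
    0 ≤ pvGmax count ps := by
  induction ps generalizing count with
  | nil => simpa [pvGmax]
  | cons p ps ih =>
    have := ih 0 le_rfl
    simp only [pvGmax]
    positivity

theorem pvAlnum_ne_sep (c : Char) (h : PySem.Chars.isalnum c = true) : (c == '\n') = false := by
  cases hb : (c == '\n') with
  | false => rfl
  | true => exact absurd (beq_iff_eq.mp hb ▸ h) (by decide)

theorem pvFold_eq_gmax (s : List Char) (count maximum : Int) (hc : 0 ≤ count) :
    max (s.foldl
        (fun (st : Int × Int) char =>
          if PySem.Chars.isalnum char then (st.1 + 1, st.2)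
          else (0, max st.2 st.1))
        (count, maximum)).2
      (s.foldl
        (fun (st : Int × Int) char =>
          if PySem.Chars.isalnum char then (st.1 + 1, st.2)
          else (0, max st.2 st.1))
        (count, maximum)).1
    = max maximum
        (pvGmax count ((s.map (fun c => if PySem.Chars.isalnum c then c else '\n')).splitOnP (· == '\n'))) := by
  induction s generalizing count maximum with
  | nil =>
    simp only [List.foldl_nil, List.map_nil, List.splitOnP_nil, pvGmax, List.length_nil,
      Int.natCast_zero, add_zero]
    omega
  | cons c cs ih =>
    by_cases h : PySem.Chars.isalnum c = true
    · simp only [List.foldl_cons, List.map_cons, h, if_pos, List.splitOnP_cons,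
        pvAlnum_ne_sep c h, Bool.false_eq_true, if_false]
      rw [ih (count + 1) maximum (by omega)]
      congr 1
      rcases hS : (cs.map (fun c => if PySem.Chars.isalnum c then c else '\n')).splitOnP (· == '\n') with _ | ⟨p, ps⟩
      · exact absurd hS (List.splitOnP_ne_nil _ _)
      · simp [pvGmax]
        omega
    · simp only [List.foldl_cons, List.map_cons, h, Bool.false_eq_true, if_false,
        List.splitOnP_cons, beq_self_eq_true, if_true]
      rw [ih 0 (max maximum count) le_rfl]
      simp only [pvGmax, List.length_nil, Int.natCast_zero, add_zero]
      omega

theorem pvFoldMax_eq_gmax (ps : List (List Char)) (a : Int) (ha : 0 ≤ a) :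
    (ps.map (fun piece => (piece.length : Int))).foldl max a = max a (pvGmax 0 ps) := by
  induction ps generalizing a with
  | nil => simp [pvGmax]; omega
  | cons p ps ih =>
    simp only [List.map_cons, List.foldl_cons, pvGmax]
    rw [ih (max a (p.length : Int)) (by positivity)]
    omega

-- ===== VERDICT (by name: the statement is the Claim_ definition above) =====
theorem easy_longest_word_spec : Claim_equal_easy_longest_word := by
  intro string _
  unfold Spec_easy_longest_word
  simp only [easy_longest_word, easy_longest_word_alt]
  rw [pvFold_eq_gmax string.toList 0 0 le_rfl]
  rcases hS : (string.toList.map (fun c => if PySem.Chars.isalnum c then c else '\n')).splitOnP (· == '\n') with _ | ⟨p, ps⟩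
  · exact absurd hS (List.splitOnP_ne_nil _ _)
  · simp only [List.map_cons]
    rw [pvFoldMax_eq_gmax ps (p.length : Int) (by positivity)]
    simp only [pvGmax]
    have := pvGmax_nonneg ps 0 le_rfl
    omega
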